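-- pv_equiv track=rewrite | github.com/Antonain1/TF-IDF_project | chatbot.py | fct_liste_mot_question
-- ===== SOURCE A (Python) =====
-- def fct_liste_mot_question(question: str):
--     """
--     permet de renvoyer sous forme de liste les mots de la questions
--     :param question: str
--     :return: list
--     """
--     question_corrigé = ""
--     for char in question:
--
--         if 64 < ord(char) < 91:
--             question_corrigé += chr(ord(char) + 32)
--         elif char == ":" or char == "." or char == "!" or char == "?" or char == "," or char == ";" or char == chr(
--                 34) or char == "-" or char == "'":
--             question_corrigé += " "
--         else:
--             question_corrigé += char
--     liste_mot_question = question_corrigé.split(" ")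
--     liste_mot_question2 = []
--     for mot in liste_mot_question:
--         if mot != "":
--             liste_mot_question2.append(mot)
--     return liste_mot_question2
-- ===== SOURCE B (Python) =====
-- def fct_liste_mot_question(question: str):
--     seps = frozenset(':.!?,;"-\' ')
--     words = []
--     cur = []
--     for ch in question:
--         if ch in seps:
--             if cur:
--                 words.append("".join(cur))
--                 cur = []
--         else:
--             o = ord(ch)
--             cur.append(chr(o + 32) if 64 < o < 91 else ch)
--     if cur:
--         words.append("".join(cur))
--     return words
-- ===== Notes on version B (the rewrite author's own statement) =====
-- stated objective: alternative
-- what changed: B tokenizes in a single pass that builds each word directly (space treated as just another separator), instead of A's three passes: build a cleaned copy of the string, split it on spaces, then filter out empty pieces.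
import Mathlib
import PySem

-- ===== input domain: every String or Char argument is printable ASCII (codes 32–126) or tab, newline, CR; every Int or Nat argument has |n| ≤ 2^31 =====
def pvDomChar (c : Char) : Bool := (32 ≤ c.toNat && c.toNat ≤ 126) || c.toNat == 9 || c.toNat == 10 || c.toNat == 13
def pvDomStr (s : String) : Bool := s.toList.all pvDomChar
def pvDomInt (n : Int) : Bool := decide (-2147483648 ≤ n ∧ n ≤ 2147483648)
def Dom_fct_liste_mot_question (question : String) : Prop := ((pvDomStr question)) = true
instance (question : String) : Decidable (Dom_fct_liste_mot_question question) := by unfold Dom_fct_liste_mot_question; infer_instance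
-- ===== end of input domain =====

-- B replaces A's three passes (clean-copy the string, split on spaces, filter empties) by one
-- pass that accumulates each word directly; same O(n) cost, alternative structure.


-- ===== PORT A =====
-- A's per-character transformation: lowercase ASCII A–Z, punctuation → space, else unchanged
def pvCleanChar (c : Char) : Char :=
  if 64 < c.toNat ∧ c.toNat < 91 then Char.ofNat (c.toNat + 32)
  else if c = ':' ∨ c = '.' ∨ c = '!' ∨ c = '?' ∨ c = ',' ∨ c = ';' ∨ c = '"' ∨ c = '-' ∨ c = '\'' then ' '
  else c

-- hand port of Python's s.split(" ") for the single-character separator " " (exact there: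
-- every occurrence of the separator cuts, empty pieces are kept)
def pvSplitSpace : List Char → List Char → List (List Char)
  | [], cur => [cur]
  | c :: rest, cur => if c = ' ' then cur :: pvSplitSpace rest [] else pvSplitSpace rest (cur ++ [c])

def fct_liste_mot_question (question : String) : List String :=
  let cleaned := question.toList.foldl (fun acc c => acc ++ [pvCleanChar c]) []
  let parts := pvSplitSpace cleaned []
  (parts.foldl (fun acc m => if m ≠ [] then acc ++ [m] else acc) []).map String.mk

-- ===== PORT B =====
def pvIsSep (c : Char) : Bool := c ∈ [':', '.', '!', '?', ',', ';', '"', '-', '\'', ' ']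

def pvLowerAZ (c : Char) : Char :=
  if 64 < c.toNat ∧ c.toNat < 91 then Char.ofNat (c.toNat + 32) else c

-- the single pass of Source B: `cur` is the word under construction, flushed at a separator / at the end
def pvGo : List Char → List Char → List String
  | [], cur => if cur.isEmpty then [] else [String.mk cur]
  | c :: rest, cur =>
      if pvIsSep c then (if cur.isEmpty then pvGo rest [] else String.mk cur :: pvGo rest [])
      else pvGo rest (cur ++ [pvLowerAZ c])

def fct_liste_mot_question_alt (question : String) : List String := pvGo question.toList []

-- ===== PRECONDITION & SPEC =====
def Spec_fct_liste_mot_question (question : String) (out : List String) : Prop := out = fct_liste_mot_question_alt question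
instance (question : String) (out : List String) : Decidable (Spec_fct_liste_mot_question question out) := by unfold Spec_fct_liste_mot_question; infer_instance

-- ===== CLAIM (what is proved, stated in full; the proofs are below) =====
def Claim_equal_fct_liste_mot_question : Prop := ∀ (question : String), Dom_fct_liste_mot_question question → Spec_fct_liste_mot_question question (fct_liste_mot_question question)

-- ===== LEMMAS AND PROOFS =====

lemma pv_foldl_clean (cs : List Char) (acc : List Char) :
    cs.foldl (fun a c => a ++ [pvCleanChar c]) acc = acc ++ cs.map pvCleanChar := by
  induction cs generalizing acc with
  | nil => simp
  | cons c rest ih => simp [List.foldl, ih]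

lemma pv_foldl_filter (l : List (List Char)) (acc : List (List Char)) :
    l.foldl (fun a m => if m ≠ [] then a ++ [m] else a) acc
      = acc ++ l.filter (fun m => !decide (m = [])) := by
  induction l generalizing acc with
  | nil => simp
  | cons m rest ih =>
    by_cases h : m = []
    · rw [List.foldl_cons, if_neg (by simp [h]), ih, List.filter_cons_of_neg (by simp [h])]
    · rw [List.foldl_cons, if_pos h, ih, List.filter_cons_of_pos (by simp [h])]
      simp

lemma pv_clean_of_sep (c : Char) (h : pvIsSep c = true) : pvCleanChar c = ' ' := by
  simp [pvIsSep] at h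
  rcases h with h|h|h|h|h|h|h|h|h|h <;> subst h <;> decide

lemma pv_clean_of_not_sep (c : Char) (h : pvIsSep c = false) :
    pvCleanChar c = pvLowerAZ c ∧ pvLowerAZ c ≠ ' ' := by
  simp [pvIsSep] at h
  obtain ⟨h1, h2, h3, h4, h5, h6, h7, h8, h9, h10⟩ := h
  constructor
  · simp [pvCleanChar, pvLowerAZ, h1, h2, h3, h4, h5, h6, h7, h8, h9]
  · unfold pvLowerAZ
    split
    · rename_i hr
      intro hc
      have hv : (c.toNat + 32).isValidChar := Or.inl (by omega)
      have ht : (Char.ofNat (c.toNat + 32)).toNat = c.toNat + 32 := by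
        rw [Char.toNat_ofNat, if_pos hv]
      rw [hc] at ht
      have h32 : (' ' : Char).toNat = 32 := by decide
      omega
    · exact h10

lemma pv_key (cs : List Char) (cur : List Char) :
    ((pvSplitSpace (cs.map pvCleanChar) cur).filter (fun m => !decide (m = []))).map String.mk
      = pvGo cs cur := by
  induction cs generalizing cur with
  | nil =>
    by_cases h : cur = [] <;>
      simp [pvSplitSpace, pvGo, h, List.isEmpty_iff]
  | cons c rest ih =>
    by_cases hs : pvIsSep c
    · have hc := pv_clean_of_sep c hs
      by_cases hcur : cur = [] <;>
        simp [pvSplitSpace, pvGo, hc, hs, hcur, ih, List.isEmpty_iff]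
    · have hns : pvIsSep c = false := by simpa using hs
      obtain ⟨hc, hne⟩ := pv_clean_of_not_sep c hns
      simp only [List.map_cons, pvSplitSpace, pvGo, hns, hc, if_neg hne, Bool.false_eq_true,
        if_false]
      exact ih (cur ++ [pvLowerAZ c])

-- ===== VERDICT (by name: the statement is the Claim_ definition above) =====
theorem fct_liste_mot_question_spec : Claim_equal_fct_liste_mot_question := by
  intro q _
  show _ = _
  unfold fct_liste_mot_question fct_liste_mot_question_alt
  simp only [pv_foldl_clean, pv_foldl_filter, List.nil_append]
  exact pv_key q.toList []
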